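-- pv_equiv track=rewrite | github.com/seojihwan/algorithm | Python/programmers/2019 kakao winter/kakao winter 3.py | solution
-- ===== SOURCE A (Python) =====
-- def solution(user_id, banned_id):
--     answer = 0
--     temp = [[] for _ in banned_id]
--
--     def isSame(a, b):
--         if len(a) == len(b):
--             for n in range(len(a)):
--                 if b[n] == "*":
--                     continue
--                 elif (a[n] != b[n]):
--                     return False
--             return True
--         else:
--             return False
--
--     for u in range(len(user_id)):
--         for b in range(len(banned_id)):
--             if isSame(user_id[u], banned_id[b]):
--                 temp[b].append(u)
--
--     temp2 = []
--
--     def bp(tmp, x):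
--         if x == len(temp):
--             if tmp not in temp2:
--                 return temp2.append(tmp)
--         else:
--             for y in range(len(temp[x])):
--                 if temp[x][y] not in tmp:
--                     tmp.append(temp[x][y])
--                     bp(sorted(tmp), x + 1)
--                     tmp.pop()
--     bp([], 0)
--
--     answer = len(temp2)
--     return answer
-- ===== SOURCE B (Python) =====
-- def solution(user_id, banned_id):
--     def match(u, b):
--         return len(u) == len(b) and all(y == "*" or x == y for x, y in zip(u, b))
--
--     temp = [[i for i, u in enumerate(user_id) if match(u, b)] for b in banned_id]
--
--     combos = [[]]
--     for cand in temp: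
--         combos = [c + [i] for c in combos for i in cand if i not in c]
--
--     return len({tuple(sorted(c)) for c in combos})
-- ===== Notes on version B (the rewrite author's own statement) =====
-- stated objective: alternative
-- what changed: Replaces A's recursive backtracking (DFS appending into a shared list, sorting at every node and deduplicating leaves by a linear scan of the result list) with an iterative layer-by-layer product of the candidate lists that prunes repeated indices inline and deduplicates once at the end via a set of sorted tuples; the matching phase becomes a zip-based comprehension.
import Mathlib
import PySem

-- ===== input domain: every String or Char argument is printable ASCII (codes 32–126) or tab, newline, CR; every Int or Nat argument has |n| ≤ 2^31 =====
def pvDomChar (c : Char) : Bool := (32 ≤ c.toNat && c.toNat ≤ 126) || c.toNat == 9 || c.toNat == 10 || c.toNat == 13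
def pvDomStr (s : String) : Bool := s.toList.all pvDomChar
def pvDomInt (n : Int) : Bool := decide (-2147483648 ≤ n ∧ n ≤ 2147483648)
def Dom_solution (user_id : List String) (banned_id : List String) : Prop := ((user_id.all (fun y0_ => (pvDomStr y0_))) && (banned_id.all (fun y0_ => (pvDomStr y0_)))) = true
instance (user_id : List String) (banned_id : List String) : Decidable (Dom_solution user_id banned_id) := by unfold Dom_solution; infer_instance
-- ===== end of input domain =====

-- B replaces A's recursive backtracking (DFS with sorted-list dedup by linear scan) by an
-- iterative layer-by-layer product of the candidate lists with inline distinctness pruning,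
-- deduplicated once at the end through a set of sorted tuples (objective: alternative).


-- ===== PORT A =====
-- helper 'isSame(a, b)': walk the characters in order, '*' in b matches anything, early False
def pvIsSameAux : List Char → List Char → Bool
  | [], _ => true
  | _, [] => true
  | x :: xs, y :: ys =>
      if y == '*' then pvIsSameAux xs ys
      else if x != y then false
      else pvIsSameAux xs ys

def pvIsSame (a b : String) : Bool :=
  if a.toList.length == b.toList.length then pvIsSameAux a.toList b.toList else false

-- the double loop 'for u … for b … temp[b].append(u)'
def pvBuildTemp (user_id banned_id : List String) : List (List Int) :=
  (List.range user_id.length).foldl (fun temp u =>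
    (List.range banned_id.length).foldl (fun temp b =>
      if pvIsSame (user_id.getD u "") (banned_id.getD b "") then temp.modify b (· ++ [(u : Int)]) else temp) temp)
    (banned_id.map (fun _ => ([] : List Int)))

-- 'bp(tmp, x)': recursion over the slots, threading the accumulator temp2
def pvBp : List (List Int) → List Int → List (List Int) → List (List Int)
  | [], tmp, acc => if tmp ∈ acc then acc else acc ++ [tmp]
  | t :: rest, tmp, acc =>
      t.foldl (fun acc2 e => if e ∈ tmp then acc2
                             else pvBp rest (PySem.List.sorted (tmp ++ [e]) (fun x => x) false) acc2) acc

def solution (user_id : List String) (banned_id : List String) : Int :=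
  ((pvBp (pvBuildTemp user_id banned_id) [] []).length : Int)

-- ===== PORT B =====
def pvMatch (u b : String) : Bool :=
  u.toList.length == b.toList.length && (u.toList.zip b.toList).all (fun p => p.2 == '*' || p.1 == p.2)

-- temp = [[i for i, u in enumerate(user_id) if match(u, b)] for b in banned_id]
def pvCandidates (user_id banned_id : List String) : List (List Int) :=
  banned_id.map (fun b => (PySem.List.enumerate user_id 0).filterMap (fun p => if pvMatch p.2 b then some p.1 else none))

-- combos = [[]]; for cand in temp: combos = [c + [i] for c in combos for i in cand if i not in c]
def pvCombos (temp : List (List Int)) : List (List Int) :=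
  temp.foldl (fun cs cand => cs.flatMap (fun c => cand.filterMap (fun i => if i ∈ c then none else some (c ++ [i])))) [[]]

-- len({tuple(sorted(c)) for c in combos})
def solution_alt (user_id : List String) (banned_id : List String) : Int :=
  ((PySem.Set.ofList ((pvCombos (pvCandidates user_id banned_id)).map
      (fun c => PySem.List.sorted c (fun x => x) false))).length : Int)

-- ===== PRECONDITION & SPEC =====
def Spec_solution (user_id : List String) (banned_id : List String) (out : Int) : Prop := out = solution_alt user_id banned_id
instance (user_id : List String) (banned_id : List String) (out : Int) : Decidable (Spec_solution user_id banned_id out) := by unfold Spec_solution; infer_instance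

-- ===== CLAIM (what is proved, stated in full; the proofs are below) =====
def Claim_equal_solution : Prop := ∀ (user_id : List String) (banned_id : List String), Dom_solution user_id banned_id → Spec_solution user_id banned_id (solution user_id banned_id)

-- ===== LEMMAS AND PROOFS =====

-- proof-local abbreviation for sorting with the identity key
def pvSortI (l : List Int) : List Int := PySem.List.sorted l (fun x => x) false

theorem pvIsSameAux_eq_zip_all (xs ys : List Char) :
    pvIsSameAux xs ys = (xs.zip ys).all (fun p => p.2 == '*' || p.1 == p.2) := by
  induction xs generalizing ys with
  | nil => simp [pvIsSameAux]
  | cons x xs ih =>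
    cases ys with
    | nil => simp [pvIsSameAux]
    | cons y ys =>
      simp only [pvIsSameAux, List.zip_cons_cons, List.all_cons, ih]
      by_cases h1 : y = '*'
      · simp [h1]
      · by_cases h2 : x = y <;> simp [h1, h2]

theorem pvIsSame_eq_pvMatch (a b : String) : pvIsSame a b = pvMatch a b := by
  rw [pvIsSame, pvMatch, pvIsSameAux_eq_zip_all]
  cases h : (a.toList.length == b.toList.length)
  · simp
  · simp

theorem pvInner_getElem? (p : Nat → Bool) (v : Int) (n : Nat) (temp : List (List Int)) (j : Nat) :
    ((List.range n).foldl (fun t b => if p b then t.modify b (· ++ [v]) else t) temp)[j]? =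
      if j < n ∧ p j then temp[j]?.map (· ++ [v]) else temp[j]? := by
  induction n with
  | zero => simp
  | succ n ih =>
    rw [List.range_succ, List.foldl_append]
    simp only [List.foldl_cons, List.foldl_nil]
    by_cases hp : p n
    · simp only [hp, if_true]
      rw [List.getElem?_modify, ih]
      by_cases hj : n = j
      · subst hj
        have h1 : ¬ n < n := by omega
        have h2 : n < n + 1 := by omega
        simp [h2, hp]
      · by_cases h1 : j < n
        · have h2 : j < n + 1 := by omega
          simp [hj, h1, h2]
        · have h2 : ¬ j < n + 1 := by omega
          simp [hj, h1, h2]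
    · rw [if_neg (by simp [hp]), ih]
      by_cases h1 : j < n
      · have h2 : j < n + 1 := by omega
        simp [h1, h2]
      · by_cases h2 : j < n + 1
        · have : j = n := by omega
          subst this
          simp [h2, hp]
        · simp [h1, h2]

theorem pvEnum_gen (f : String → Bool) (xs : List String) : ∀ (s : Nat),
    (PySem.List.enumerate xs (s : Int)).filterMap (fun p => if f p.2 then some p.1 else none) =
      ((List.range xs.length).filter (fun u => f (xs.getD u ""))).map (fun u => ((s + u : Nat) : Int)) := by
  induction xs with
  | nil => intro s; simp [PySem.List.enumerate_nil]
  | cons x xs ih =>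
    intro s
    rw [PySem.List.enumerate_cons, List.filterMap_cons]
    have hcast : (s : Int) + 1 = ((s + 1 : Nat) : Int) := by push_cast; ring
    rw [hcast, ih (s + 1)]
    rw [List.length_cons, List.range_succ_eq_map, List.filter_cons, List.filter_map]
    have hq : List.filter ((fun u => f ((x :: xs).getD u "")) ∘ Nat.succ) (List.range xs.length) =
        List.filter (fun u => f (xs.getD u "")) (List.range xs.length) := by
      apply List.filter_congr
      intro u _
      simp [Function.comp]
    have htail : ((List.range xs.length).filter (fun u => f (xs.getD u ""))).map (fun u => ((s + 1 + u : Nat) : Int)) =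
        (List.filter ((fun u => f ((x :: xs).getD u "")) ∘ Nat.succ) (List.range xs.length)).map
          ((fun u => ((s + u : Nat) : Int)) ∘ Nat.succ) := by
      rw [hq]
      apply List.map_congr_left
      intro u _
      simp [Function.comp]
      ring
    by_cases hf : f x
    · simp only [List.getD_cons_zero, hf, if_pos, List.map_cons, List.map_map, htail]
      simp
    · simp only [List.getD_cons_zero, hf, htail]
      simp

theorem pvBuildTemp_getElem? (user_id banned_id : List String) (U : Nat) (j : Nat) :
    ((List.range U).foldl (fun temp u =>
      (List.range banned_id.length).foldl (fun temp b =>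
        if pvIsSame (user_id.getD u "") (banned_id.getD b "") then temp.modify b (· ++ [(u : Int)]) else temp) temp)
      (banned_id.map (fun _ => ([] : List Int))))[j]? =
    (banned_id[j]?).map (fun bid =>
      ((List.range U).filter (fun u => pvIsSame (user_id.getD u "") bid)).map (fun (u : Nat) => (u : Int))) := by
  induction U with
  | zero =>
    simp only [List.range_zero, List.foldl_nil, List.getElem?_map, List.filter_nil, List.map_nil]
  | succ U ih =>
    rw [List.range_succ, List.foldl_append, List.foldl_cons, List.foldl_nil]
    rw [pvInner_getElem? (fun b => pvIsSame (user_id.getD U "") (banned_id.getD b "")) (U : Int)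
        banned_id.length _ j, ih]
    by_cases hj : j < banned_id.length
    · have hbj : banned_id[j]? = some banned_id[j] := List.getElem?_eq_getElem hj
      have hgd : banned_id.getD j "" = banned_id[j] := by
        simp [List.getD, hbj]
      simp only [List.filter_append, List.map_append]
      by_cases hp : pvIsSame (user_id.getD U "") (banned_id.getD j "")
      · rw [if_pos ⟨hj, hp⟩]
        have hp' : pvIsSame (user_id[U]?.getD "") banned_id[j] = true := by
          have h2 := hgd ▸ hp
          simpa [List.getD] using h2
        simp [hbj, hp']
      · rw [if_neg (by tauto)]
        simp only [hbj, Option.map_some]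
        rw [hgd] at hp
        have hp' : pvIsSame (user_id[U]?.getD "") banned_id[j] = false := by
          simp only [Bool.not_eq_true] at hp
          simpa [List.getD] using hp
        simp [hp']
    · have hbj : banned_id[j]? = none := List.getElem?_eq_none (by omega)
      rw [if_neg (by tauto)]
      simp [hbj]

theorem pvBuildTemp_eq_pvCandidates (user_id banned_id : List String) :
    pvBuildTemp user_id banned_id = pvCandidates user_id banned_id := by
  apply List.ext_getElem?
  intro j
  rw [pvBuildTemp, pvBuildTemp_getElem?, pvCandidates, List.getElem?_map]
  cases hbj : banned_id[j]? with
  | none => simp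
  | some bid =>
    simp only [Option.map_some, Option.some_inj]
    have : (0 : Int) = ((0 : Nat) : Int) := rfl
    rw [this, pvEnum_gen (fun s => pvMatch s bid) user_id 0]
    rw [List.filter_congr (fun u _ => by rw [pvIsSame_eq_pvMatch])]
    simp

theorem pvFoldl_mem_generic {α β : Type} (t : List β) (g : β → List α → List α) (a : α) (Q : β → Prop)
    (h : ∀ e acc, a ∈ g e acc ↔ a ∈ acc ∨ Q e) :
    ∀ acc, (a ∈ t.foldl (fun acc e => g e acc) acc ↔ a ∈ acc ∨ ∃ e ∈ t, Q e) := by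
  induction t with
  | nil => simp
  | cons e t ih =>
    intro acc
    simp only [List.foldl_cons, ih, h, List.mem_cons]
    constructor
    · rintro ((ha | hq) | ⟨e', he', hq⟩)
      · exact Or.inl ha
      · exact Or.inr ⟨e, Or.inl rfl, hq⟩
      · exact Or.inr ⟨e', Or.inr he', hq⟩
    · rintro (ha | ⟨e', (rfl | he'), hq⟩)
      · exact Or.inl (Or.inl ha)
      · exact Or.inl (Or.inr hq)
      · exact Or.inr ⟨e', he', hq⟩

theorem pvFoldl_nodup_generic {α β : Type} (t : List β) (g : β → List α → List α)
    (h : ∀ e acc, acc.Nodup → (g e acc).Nodup) :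
    ∀ acc, acc.Nodup → (t.foldl (fun acc e => g e acc) acc).Nodup := by
  induction t with
  | nil => exact fun acc ha => ha
  | cons e t ih => exact fun acc ha => ih _ (h e acc ha)

theorem pvSortI_perm_inv (l l' : List Int) (h : l.Perm l') : pvSortI l = pvSortI l' :=
  PySem.List.sorted_eq_sorted_of_perm l l' (fun x => x) (fun _ _ h => h) h

theorem mem_pvBp (T : List (List Int)) : ∀ (tmp : List Int) (acc : List (List Int)) (a : List Int),
    tmp.Pairwise (· ≤ ·) →
    (a ∈ pvBp T tmp acc ↔
      a ∈ acc ∨ ∃ c, List.Forall₂ (· ∈ ·) c T ∧ c.Nodup ∧ (∀ x ∈ c, x ∉ tmp) ∧ a = pvSortI (tmp ++ c)) := by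
  induction T with
  | nil =>
    intro tmp acc a htmp
    have hs : pvSortI tmp = tmp := PySem.List.sorted_eq_self_of_pairwise tmp (fun x => x) htmp
    simp only [pvBp, List.forall₂_nil_right_iff]
    constructor
    · intro h
      by_cases hm : tmp ∈ acc
      · rw [if_pos hm] at h; exact Or.inl h
      · rw [if_neg hm, List.mem_append, List.mem_singleton] at h
        rcases h with h | h
        · exact Or.inl h
        · exact Or.inr ⟨[], rfl, List.nodup_nil, by simp, by simpa [hs] using h⟩
    · rintro (h | ⟨c, rfl, -, -, rfl⟩)
      · by_cases hm : tmp ∈ acc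
        · rwa [if_pos hm]
        · rw [if_neg hm, List.mem_append]; exact Or.inl h
      · simp only [List.append_nil, hs]
        by_cases hm : tmp ∈ acc
        · rwa [if_pos hm]
        · rw [if_neg hm, List.mem_append, List.mem_singleton]; exact Or.inr rfl
  | cons t rest ih =>
    intro tmp acc a htmp
    show a ∈ t.foldl (fun acc2 e => if e ∈ tmp then acc2
        else pvBp rest (PySem.List.sorted (tmp ++ [e]) (fun x => x) false) acc2) acc ↔ _
    have key := pvFoldl_mem_generic t
      (fun e acc2 => if e ∈ tmp then acc2
        else pvBp rest (PySem.List.sorted (tmp ++ [e]) (fun x => x) false) acc2) a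
      (fun e => e ∉ tmp ∧ ∃ c', List.Forall₂ (· ∈ ·) c' rest ∧ c'.Nodup ∧
        (∀ x ∈ c', x ∉ tmp ∧ x ≠ e) ∧ a = pvSortI (tmp ++ e :: c'))
      (by
        intro e acc2
        dsimp only
        by_cases he : e ∈ tmp
        · simp [he]
        · rw [if_neg he]
          set tmp' := PySem.List.sorted (tmp ++ [e]) (fun x => x) false with htmp'
          have hperm : tmp'.Perm (tmp ++ [e]) := PySem.List.sorted_perm (tmp ++ [e]) (fun x => x) false
          have hpw : tmp'.Pairwise (· ≤ ·) := PySem.List.sorted_pairwise (tmp ++ [e]) (fun x => x)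
          rw [ih tmp' acc2 a hpw]
          constructor
          · rintro (h | ⟨c', h1, h2, h3, rfl⟩)
            · exact Or.inl h
            · refine Or.inr ⟨he, c', h1, h2, ?_, ?_⟩
              · intro x hx
                have := h3 x hx
                rw [hperm.mem_iff, List.mem_append, List.mem_singleton] at this
                push Not at this
                exact this
              · refine pvSortI_perm_inv _ _ ?_
                simpa using hperm.append_right c'
          · rintro (h | ⟨-, c', h1, h2, h3, rfl⟩)
            · exact Or.inl h
            · refine Or.inr ⟨c', h1, h2, ?_, ?_⟩
              · intro x hx
                rw [hperm.mem_iff, List.mem_append, List.mem_singleton]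
                push Not
                exact h3 x hx
              · refine pvSortI_perm_inv _ _ ?_
                simpa using (hperm.append_right c').symm)
      acc
    rw [key]
    constructor
    · rintro (h | ⟨e, het, hetmp, c', h1, h2, h3, rfl⟩)
      · exact Or.inl h
      · refine Or.inr ⟨e :: c', List.forall₂_cons.mpr ⟨het, h1⟩, ?_, ?_, rfl⟩
        · exact List.nodup_cons.mpr ⟨fun hx => (h3 e hx).2 rfl, h2⟩
        · intro x hx
          rcases List.mem_cons.mp hx with rfl | hx
          · exact hetmp
          · exact (h3 x hx).1
    · rintro (h | ⟨c, hf, hnd, hnm, rfl⟩)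
      · exact Or.inl h
      · rcases List.forall₂_cons_right_iff.mp hf with ⟨e, c', het, h1, rfl⟩
        have hnd' := List.nodup_cons.mp hnd
        refine Or.inr ⟨e, het, hnm e (List.mem_cons_self), c', h1, hnd'.2, ?_, rfl⟩
        intro x hx
        exact ⟨hnm x (List.mem_cons_of_mem _ hx), fun hxe => hnd'.1 (hxe ▸ hx)⟩

theorem nodup_pvBp (T : List (List Int)) : ∀ (tmp : List Int) (acc : List (List Int)),
    acc.Nodup → (pvBp T tmp acc).Nodup := by
  induction T with
  | nil =>
    intro tmp acc h
    simp only [pvBp]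
    by_cases hm : tmp ∈ acc
    · rwa [if_pos hm]
    · rw [if_neg hm]
      have h2 : ∀ a ∈ acc, ¬ a = tmp := fun a ha hat => hm (hat ▸ ha)
      simp only [List.nodup_append, List.nodup_singleton, true_and]
      exact ⟨h, by simpa using h2⟩
  | cons t rest ih =>
    intro tmp acc h
    show (t.foldl (fun acc2 e => if e ∈ tmp then acc2
        else pvBp rest (PySem.List.sorted (tmp ++ [e]) (fun x => x) false) acc2) acc).Nodup
    refine pvFoldl_nodup_generic t _ ?_ acc h
    intro e acc2 h2
    by_cases he : e ∈ tmp
    · rwa [if_pos he]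
    · rw [if_neg he]; exact ih _ _ h2

theorem pvCombos_foldl_mem (T : List (List Int)) : ∀ (cs : List (List Int)) (c : List Int),
    (c ∈ T.foldl (fun cs cand => cs.flatMap (fun c => cand.filterMap (fun i => if i ∈ c then none else some (c ++ [i])))) cs ↔
      ∃ c0 ∈ cs, ∃ e, c = c0 ++ e ∧ List.Forall₂ (· ∈ ·) e T ∧ e.Nodup ∧ ∀ x ∈ e, x ∉ c0) := by
  induction T with
  | nil =>
    intro cs c
    simp only [List.foldl_nil, List.forall₂_nil_right_iff]
    constructor
    · intro h; exact ⟨c, h, [], by simp⟩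
    · rintro ⟨c0, h0, e, rfl, rfl, -⟩; simpa using h0
  | cons cand T ih =>
    intro cs c
    rw [List.foldl_cons, ih]
    constructor
    · rintro ⟨c0', h0', e', rfl, h1, h2, h3⟩
      rw [List.mem_flatMap] at h0'
      rcases h0' with ⟨c0, h0, hmem⟩
      rw [List.mem_filterMap] at hmem
      rcases hmem with ⟨i, hi, hif⟩
      by_cases hic : i ∈ c0
      · simp [hic] at hif
      · simp only [hic, if_false] at hif
        obtain rfl : c0 ++ [i] = c0' := Option.some.inj hif
        refine ⟨c0, h0, i :: e', by simp, List.forall₂_cons.mpr ⟨hi, h1⟩, ?_, ?_⟩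
        · refine List.nodup_cons.mpr ⟨fun hx => ?_, h2⟩
          exact (h3 i hx) (by simp)
        · intro x hx
          rcases List.mem_cons.mp hx with rfl | hx
          · exact hic
          · intro hxc0
            exact (h3 x hx) (by simp [hxc0])
    · rintro ⟨c0, h0, e, rfl, hf, hnd, hnm⟩
      rcases List.forall₂_cons_right_iff.mp hf with ⟨i, e', hi, h1, rfl⟩
      have hnd' := List.nodup_cons.mp hnd
      refine ⟨c0 ++ [i], ?_, e', by simp, h1, hnd'.2, ?_⟩
      · rw [List.mem_flatMap]
        refine ⟨c0, h0, ?_⟩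
        rw [List.mem_filterMap]
        exact ⟨i, hi, by simp [hnm i List.mem_cons_self]⟩
      · intro x hx
        rw [List.mem_append, List.mem_singleton]
        push Not
        exact ⟨hnm x (List.mem_cons_of_mem _ hx), fun hxe => hnd'.1 (hxe ▸ hx)⟩

theorem mem_pvCombos (T : List (List Int)) (c : List Int) :
    c ∈ pvCombos T ↔ List.Forall₂ (· ∈ ·) c T ∧ c.Nodup := by
  rw [pvCombos, pvCombos_foldl_mem]
  constructor
  · rintro ⟨c0, h0, e, rfl, h1, h2, -⟩
    rcases List.mem_singleton.mp h0 with rfl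
    simpa using ⟨h1, h2⟩
  · rintro ⟨h1, h2⟩
    exact ⟨[], by simp, c, by simp, h1, h2, by simp⟩

theorem pvCount_eq (T : List (List Int)) :
    (pvBp T [] []).length =
      (PySem.Set.ofList ((pvCombos T).map (fun c => PySem.List.sorted c (fun x => x) false))).length := by
  have hA : (pvBp T [] []).Nodup := nodup_pvBp T [] [] List.nodup_nil
  have hB : (PySem.Set.ofList ((pvCombos T).map (fun c => PySem.List.sorted c (fun x => x) false))).Nodup :=
    PySem.Set.nodup_ofList _
  have hmem : ∀ a, a ∈ pvBp T [] [] ↔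
      a ∈ PySem.Set.ofList ((pvCombos T).map (fun c => PySem.List.sorted c (fun x => x) false)) := by
    intro a
    rw [mem_pvBp T [] [] a List.Pairwise.nil, PySem.Set.mem_ofList, List.mem_map]
    constructor
    · rintro (h | ⟨c, h1, h2, -, rfl⟩)
      · simp at h
      · exact ⟨c, (mem_pvCombos T c).mpr ⟨h1, h2⟩, rfl⟩
    · rintro ⟨c, hc, rfl⟩
      rcases (mem_pvCombos T c).mp hc with ⟨h1, h2⟩
      exact Or.inr ⟨c, h1, h2, by simp, by simp [pvSortI]⟩
  exact ((List.perm_ext_iff_of_nodup hA hB).mpr hmem).length_eq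

-- ===== VERDICT (by name: the statement is the Claim_ definition above) =====
theorem solution_spec : Claim_equal_solution := by
  intro user_id banned_id _
  unfold Spec_solution solution solution_alt
  rw [pvBuildTemp_eq_pvCandidates, pvCount_eq]
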